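-- pv_equiv track=rewrite | github.com/WinLakeLee/404-ai | patchcore.py | _place_label_box
-- ===== SOURCE A (Python) =====
-- def _place_label_box(x1, y1, label_size, occupied_boxes, img_h):
--     """Place label to reduce overlap; returns (top, bottom)."""
--     height = label_size[1] + 10
--     top = max(y1 - height, 5)
--     bottom = top + height
--
--     def _overlaps(a, b):
--         ax1, ay1, ax2, ay2 = a
--         bx1, by1, bx2, by2 = b
--         return not (ax2 < bx1 or ax1 > bx2 or ay2 < by1 or ay1 > by2)
--
--     for _ in range(8):
--         box = (x1, top, x1 + label_size[0], bottom)
--         has_overlap = any(_overlaps(box, other) for other in occupied_boxes)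
--         if not has_overlap and bottom < img_h - 5:
--             break
--         # move label downward to avoid overlap; clamp near bottom
--         top = min(img_h - height - 5, top + height + 6)
--         bottom = top + height
--
--     occupied_boxes.append((x1, top, x1 + label_size[0], bottom))
--     return top, bottom
-- ===== SOURCE B (Python) =====
-- def _place_label_box(x1, y1, label_size, occupied_boxes, img_h):
--     """Place label to reduce overlap; returns (top, bottom).
--
--     B: build the fixed 9-candidate top schedule once; then, instead of
--     scanning candidates and re-scanning the boxes for each, make a SINGLE
--     pass over occupied_boxes that fills an 8-entry blocked[] table (each box
--     marks every candidate it overlaps), and finally pick the first unblocked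
--     candidate by a back-to-front sweep, defaulting to the 9th candidate.
--     Appends the chosen box to occupied_boxes, like A."""
--     w, h = label_size
--     height = h + 10
--     cap = img_h - height - 5
--     tops = [max(y1 - height, 5)]
--     while len(tops) < 9:
--         tops.append(min(cap, tops[-1] + height + 6))
--     # candidates whose bottom does not fit above img_h - 5 are blocked outright
--     blocked = [t + height >= img_h - 5 for t in tops[:8]]
--     for bx1, by1, bx2, by2 in occupied_boxes:
--         if bx1 <= x1 + w and x1 <= bx2:  # horizontal spans always meet
--             for k in range(8):
--                 if tops[k] <= by2 and by1 <= tops[k] + height: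
--                     blocked[k] = True
--     top = tops[8]
--     for k in range(7, -1, -1):
--         if not blocked[k]:
--             top = tops[k]
--     bottom = top + height
--     occupied_boxes.append((x1, top, x1 + w, bottom))
--     return top, bottom
-- ===== Notes on version B (the rewrite author's own statement) =====
-- stated objective: alternative
-- what changed: A scans up to 8 candidate positions, re-scanning occupied_boxes for each with an early break; B inverts the loops: one pass over occupied_boxes fills an 8-entry blocked table (each box marks every candidate it overlaps), then a back-to-front sweep picks the first unblocked candidate, defaulting to the 9th.
import Mathlib
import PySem

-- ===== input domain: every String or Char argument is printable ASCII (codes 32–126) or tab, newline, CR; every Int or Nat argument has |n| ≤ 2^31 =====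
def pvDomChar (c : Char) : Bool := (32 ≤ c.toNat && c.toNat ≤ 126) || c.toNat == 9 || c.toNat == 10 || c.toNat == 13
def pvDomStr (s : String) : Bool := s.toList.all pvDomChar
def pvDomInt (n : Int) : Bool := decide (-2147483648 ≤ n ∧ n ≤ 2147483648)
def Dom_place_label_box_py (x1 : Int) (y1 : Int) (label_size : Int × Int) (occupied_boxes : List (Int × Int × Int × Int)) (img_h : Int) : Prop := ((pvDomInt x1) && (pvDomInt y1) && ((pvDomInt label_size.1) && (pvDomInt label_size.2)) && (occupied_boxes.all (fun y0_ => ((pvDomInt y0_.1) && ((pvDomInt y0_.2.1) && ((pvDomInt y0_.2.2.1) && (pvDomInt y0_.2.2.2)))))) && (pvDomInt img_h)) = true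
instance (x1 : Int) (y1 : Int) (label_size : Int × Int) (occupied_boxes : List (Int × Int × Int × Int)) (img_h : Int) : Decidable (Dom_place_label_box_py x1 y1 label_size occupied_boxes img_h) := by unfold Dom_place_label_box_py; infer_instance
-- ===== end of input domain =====

-- B replaces A's candidate-by-candidate scan (each re-scanning the boxes with early break)
-- by ONE pass over occupied_boxes filling an 8-entry blocked table, then a back-to-front
-- sweep picking the first free candidate (alternative decomposition, same cost).
-- Both Pythons append the chosen box to occupied_boxes (identical mutation); the
-- equivalence proved here is about the RETURN value.

-- ===== PORT A =====
def pvOverlapsA (a b : Int × Int × Int × Int) : Bool :=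
  let (ax1, ay1, ax2, ay2) := a
  let (bx1, by1, bx2, by2) := b
  !(ax2 < bx1 || ax1 > bx2 || ay2 < by1 || ay1 > by2)

-- the `for _ in range(8)` loop of A, over its state `top` (bottom = top + height throughout)
def pvLoopA (x1 w : Int) (occ : List (Int × Int × Int × Int)) (img_h height : Int) :
    Nat → Int → Int
  | 0, top => top
  | n + 1, top =>
    let bottom := top + height
    let box := (x1, top, x1 + w, bottom)
    let has_overlap := occ.any (fun other => pvOverlapsA box other)
    if !has_overlap && bottom < img_h - 5 then top
    else pvLoopA x1 w occ img_h height n (min (img_h - height - 5) (top + height + 6))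

def place_label_box_py (x1 : Int) (y1 : Int) (label_size : Int × Int) (occupied_boxes : List (Int × Int × Int × Int)) (img_h : Int) : Int × Int :=
  let height := label_size.2 + 10
  let top := max (y1 - height) 5
  let top := pvLoopA x1 label_size.1 occupied_boxes img_h height 8 top
  (top, top + height)

-- ===== PORT B =====
-- the `while len(tops) < 9` builder: t, then each successor min(cap, t + height + 6)
def pvTopsB (cap height : Int) : Nat → Int → List Int
  | 0, t => [t]
  | n + 1, t => t :: pvTopsB cap height n (min cap (t + height + 6))

def place_label_box_py_alt (x1 : Int) (y1 : Int) (label_size : Int × Int) (occupied_boxes : List (Int × Int × Int × Int)) (img_h : Int) : Int × Int :=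
  let w := label_size.1
  let height := label_size.2 + 10
  let cap := img_h - height - 5
  let tops := pvTopsB cap height 8 (max (y1 - height) 5)   -- 9 candidates
  let tops8 := tops.take 8                                  -- tops[:8]
  let blocked0 := tops8.map (fun t => decide (t + height ≥ img_h - 5))
  let blocked := occupied_boxes.foldl (fun bl box =>
      if box.1 ≤ x1 + w && x1 ≤ box.2.2.1 then
        List.zipWith (fun t b => b || (decide (t ≤ box.2.2.2) && decide (box.2.1 ≤ t + height))) tops8 bl
      else bl) blocked0
  -- `top = tops[8]; for k in range(7,-1,-1): if not blocked[k]: top = tops[k]`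
  -- tops[8] is the last of the 9 elements
  let top := (tops8.zip blocked).foldr (fun tb top => if tb.2 then top else tb.1) (tops.getLastD 0)
  (top, top + height)

-- ===== PRECONDITION & SPEC =====
def Spec_place_label_box_py (x1 : Int) (y1 : Int) (label_size : Int × Int) (occupied_boxes : List (Int × Int × Int × Int)) (img_h : Int) (out : Int × Int) : Prop := out = place_label_box_py_alt x1 y1 label_size occupied_boxes img_h
instance (x1 : Int) (y1 : Int) (label_size : Int × Int) (occupied_boxes : List (Int × Int × Int × Int)) (img_h : Int) (out : Int × Int) : Decidable (Spec_place_label_box_py x1 y1 label_size occupied_boxes img_h out) := by unfold Spec_place_label_box_py; infer_instance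

-- ===== CLAIM (what is proved, stated in full; the proofs are below) =====
def Claim_equal_place_label_box_py : Prop := ∀ (x1 : Int) (y1 : Int) (label_size : Int × Int) (occupied_boxes : List (Int × Int × Int × Int)) (img_h : Int), Dom_place_label_box_py x1 y1 label_size occupied_boxes img_h → Spec_place_label_box_py x1 y1 label_size occupied_boxes img_h (place_label_box_py x1 y1 label_size occupied_boxes img_h)

-- ===== LEMMAS AND PROOFS =====

-- A's acceptance test of a candidate top t
def pvAcc (x1 w : Int) (occ : List (Int × Int × Int × Int)) (img_h height t : Int) : Bool :=
  !(occ.any fun other => pvOverlapsA (x1, t, x1 + w, t + height) other) && decide (t + height < img_h - 5)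

-- last element of the candidate list
def pvLastB (cap height : Int) : Nat → Int → Int
  | 0, t => t
  | n + 1, t => pvLastB cap height n (min cap (t + height + 6))

theorem pvTopsB_getLastD (cap height : Int) :
    ∀ (n : Nat) (t d : Int), (pvTopsB cap height n t).getLastD d = pvLastB cap height n t := by
  intro n
  induction n with
  | zero => intro t d; simp [pvTopsB, pvLastB]
  | succ n ih =>
    intro t d
    simp only [pvTopsB, pvLastB, List.getLastD_cons]
    exact ih _ _

-- A's loop = first acceptable of the first n candidates, else the (n+1)-th
theorem pvLoopA_eq_scan (x1 w : Int) (occ : List (Int × Int × Int × Int)) (img_h height : Int) :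
    ∀ (n : Nat) (t : Int),
      pvLoopA x1 w occ img_h height n t =
        (((pvTopsB (img_h - height - 5) height n t).take n).find?
            (fun u => pvAcc x1 w occ img_h height u)).getD
          (pvLastB (img_h - height - 5) height n t) := by
  intro n
  induction n with
  | zero => intro t; simp [pvLoopA, pvTopsB, pvLastB]
  | succ n ih =>
    intro t
    simp only [pvLoopA, pvTopsB, pvLastB, List.take_succ_cons, List.find?_cons]
    cases h : ((!occ.any fun other => pvOverlapsA (x1, t, x1 + w, t + height) other)
        && decide (t + height < img_h - 5)) with
    | true =>
      have h2 : pvAcc x1 w occ img_h height t = true := h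
      simp [h2]
    | false =>
      have h2 : pvAcc x1 w occ img_h height t = false := h
      simp [h2, ih]

-- one box's vertical block bit at candidate t (with the horizontal prefilter)
def pvBlk (x1 w height t : Int) (box : Int × Int × Int × Int) : Bool :=
  (box.1 ≤ x1 + w && x1 ≤ box.2.2.1) && (decide (t ≤ box.2.2.2) && decide (box.2.1 ≤ t + height))

theorem pvOverlaps_eq_blk (x1 w height t : Int) (box : Int × Int × Int × Int) :
    pvOverlapsA (x1, t, x1 + w, t + height) box = pvBlk x1 w height t box := by
  obtain ⟨bx1, by1, bx2, by2⟩ := box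
  simp only [pvOverlapsA, pvBlk, Bool.not_or]
  by_cases h1 : bx1 ≤ x1 + w <;> by_cases h2 : x1 ≤ bx2 <;>
    by_cases h3 : t ≤ by2 <;> by_cases h4 : by1 ≤ t + height <;>
      simp [h1, h2, h3, h4, not_lt]; omega

-- B's foldl over the boxes, started on a mapped list, is the pointwise any
theorem pvBlocked_fold (x1 w height : Int) :
    ∀ (occ : List (Int × Int × Int × Int)) (g : Int → Bool) (ts : List Int),
      occ.foldl (fun bl box =>
          if box.1 ≤ x1 + w && x1 ≤ box.2.2.1 then
            List.zipWith (fun t b => b || (decide (t ≤ box.2.2.2) && decide (box.2.1 ≤ t + height))) ts bl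
          else bl) (ts.map g)
        = ts.map (fun t => g t || occ.any (fun box => pvBlk x1 w height t box)) := by
  intro occ
  induction occ with
  | nil => intro g ts; simp
  | cons b bs ih =>
    intro g ts
    simp only [List.foldl_cons, List.any_cons]
    by_cases hb : (b.1 ≤ x1 + w && x1 ≤ b.2.2.1) = true
    · rw [if_pos hb]
      have hz : List.zipWith (fun t bo => bo || (decide (t ≤ b.2.2.2) && decide (b.2.1 ≤ t + height))) ts (ts.map g)
          = ts.map (fun t => g t || (decide (t ≤ b.2.2.2) && decide (b.2.1 ≤ t + height))) := by
        induction ts with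
        | nil => simp
        | cons t ts iht => simp [iht]
      rw [hz, ih]
      apply List.map_congr_left
      intro t _
      simp [pvBlk, hb, Bool.or_assoc]
    · rw [if_neg hb, ih]
      apply List.map_congr_left
      intro t _
      have hb' : (b.1 ≤ x1 + w && x1 ≤ b.2.2.1) = false := by simpa using hb
      simp [pvBlk, hb']

-- the back-to-front sweep over (tops, blocked) picks the first candidate with p, else d
theorem pvSweep_eq_find (p : Int → Bool) :
    ∀ (ts : List Int) (d : Int),
      ((ts.zip (ts.map fun t => !p t)).foldr (fun tb top => if tb.2 then top else tb.1) d)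
        = ((ts.find? p).getD d) := by
  intro ts
  induction ts with
  | nil => intro d; simp
  | cons t ts ih =>
    intro d
    simp only [List.map_cons, List.zip_cons_cons, List.foldr_cons, List.find?_cons]
    cases hp : p t <;> simp [ih]

-- ===== VERDICT (by name: the statement is the Claim_ definition above) =====
theorem place_label_box_py_spec : Claim_equal_place_label_box_py := by
  intro x1 y1 ls occ img_h _
  unfold Spec_place_label_box_py place_label_box_py place_label_box_py_alt
  simp only [pvLoopA_eq_scan, pvTopsB_getLastD]
  have hany : ∀ t : Int, (occ.any fun box => pvBlk x1 ls.1 (ls.2 + 10) t box)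
      = (occ.any fun other => pvOverlapsA (x1, t, x1 + ls.1, t + (ls.2 + 10)) other) := by
    intro t
    induction occ with
    | nil => simp
    | cons b bs ihb => simp [pvOverlaps_eq_blk]
  have hblk := pvBlocked_fold x1 ls.1 (ls.2 + 10) occ
      (fun t => decide (t + (ls.2 + 10) ≥ img_h - 5))
      ((pvTopsB (img_h - (ls.2 + 10) - 5) (ls.2 + 10) 8 (max (y1 - (ls.2 + 10)) 5)).take 8)
  rw [hblk]
  have hmap : ((pvTopsB (img_h - (ls.2 + 10) - 5) (ls.2 + 10) 8 (max (y1 - (ls.2 + 10)) 5)).take 8).map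
        (fun t => decide (t + (ls.2 + 10) ≥ img_h - 5) || occ.any (fun box => pvBlk x1 ls.1 (ls.2 + 10) t box))
      = ((pvTopsB (img_h - (ls.2 + 10) - 5) (ls.2 + 10) 8 (max (y1 - (ls.2 + 10)) 5)).take 8).map
        (fun t => !pvAcc x1 ls.1 occ img_h (ls.2 + 10) t) := by
    apply List.map_congr_left
    intro t _
    have hd : decide (t + (ls.2 + 10) ≥ img_h - 5) = !decide (t + (ls.2 + 10) < img_h - 5) := by
      have hiff : (t + (ls.2 + 10) ≥ img_h - 5) ↔ ¬(t + (ls.2 + 10) < img_h - 5) := by omega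
      simp only [hiff, decide_not]
    rw [hd, hany, pvAcc, Bool.not_and, Bool.not_not, Bool.or_comm]
  rw [hmap, pvSweep_eq_find]
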